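-- pv_equiv track=rewrite | github.com/openshift/lightspeed-service | tests/integration/test_config.py | remove_items_one_iteration
-- ===== SOURCE A (Python) =====
-- import copy
--
-- def remove_items_one_iteration(
--     original_payload, items_count, remove_flags, selector=None
-- ):
--     """One iteration of algorithm to remove item or items from the original payload."""
--     if selector is None:
--         keys = list(original_payload.keys())
--     else:
--         keys = list(original_payload[selector].keys())
--
--     # perform deep copy of original payload before modification
--     new_payload = copy.deepcopy(original_payload)
--
--     removed_keys = []
--     for i in range(items_count):
--         # should be the item under index i removed?
--         remove_flag = remove_flags[i]
--         if remove_flag: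
--             key = keys[i]
--             if selector is None:
--                 del new_payload[key]
--             else:
--                 del new_payload[selector][key]
--             removed_keys.append(key)
--     return new_payload
-- ===== SOURCE B (Python) =====
-- import copy
--
--
-- def remove_items_one_iteration(
--     original_payload, items_count, remove_flags, selector=None
-- ):
--     """One iteration of algorithm to remove item or items from the original payload."""
--
--     def keep(j):
--         # position j survives unless it is inside the flagged window and flagged
--         return not (j < items_count and remove_flags[j])
--
--     if selector is None:
--         # rebuild the payload positionally: no key list, no deletions
--         return {
--             k: copy.deepcopy(v)
--             for j, (k, v) in enumerate(original_payload.items())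
--             if keep(j)
--         }
--
--     new_payload = copy.deepcopy(original_payload)
--     new_payload[selector] = {
--         k: v
--         for j, (k, v) in enumerate(new_payload[selector].items())
--         if keep(j)
--     }
--     return new_payload
-- ===== Notes on version B (the rewrite author's own statement) =====
-- stated objective: simpler
-- what changed: Instead of deep-copying the whole payload, materialising the key list and mutating with one del per flagged index, B never builds a key list at all: it rebuilds the payload (or the selected sub-dict) in a single enumerate pass, keeping each entry positionally unless its index is inside the flagged window and flagged.
import Mathlib
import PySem

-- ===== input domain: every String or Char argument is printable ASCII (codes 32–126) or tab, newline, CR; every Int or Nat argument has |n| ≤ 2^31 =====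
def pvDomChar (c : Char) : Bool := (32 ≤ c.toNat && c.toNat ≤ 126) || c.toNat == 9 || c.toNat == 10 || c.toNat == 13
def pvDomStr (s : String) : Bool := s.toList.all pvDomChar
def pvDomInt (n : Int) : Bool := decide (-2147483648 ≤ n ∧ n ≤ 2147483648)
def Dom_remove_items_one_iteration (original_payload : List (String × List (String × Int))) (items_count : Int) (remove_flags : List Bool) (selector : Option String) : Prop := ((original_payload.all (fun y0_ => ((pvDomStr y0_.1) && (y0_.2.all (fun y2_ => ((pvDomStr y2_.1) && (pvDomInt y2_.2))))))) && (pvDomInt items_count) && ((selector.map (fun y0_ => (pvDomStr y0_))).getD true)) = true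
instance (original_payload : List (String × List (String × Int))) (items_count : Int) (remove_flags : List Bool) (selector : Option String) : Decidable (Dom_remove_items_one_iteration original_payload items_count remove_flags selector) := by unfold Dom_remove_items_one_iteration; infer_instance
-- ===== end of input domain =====

-- ===== PORT A =====
-- B rebuilds the payload in one positional enumerate pass (no key list, no deletions)
-- instead of deep-copying and repeatedly del-ing by key (objective: simpler). Return-value
-- equivalence only: A mutates its deep copy, neither mutates the caller's argument.
def remove_items_one_iteration (original_payload : List (String × List (String × Int))) (items_count : Int) (remove_flags : List Bool) (selector : Option String) : List (String × List (String × Int)) :=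
  -- keys = list(original_payload.keys()) / list(original_payload[selector].keys())
  -- (original_payload[selector] raises KeyError when absent: excluded by Pre_, here getD)
  let keys : List String :=
    match selector with
    | none => (PySem.Dict.mk original_payload).keys
    | some s => (PySem.Dict.mk ((PySem.Dict.mk original_payload).getD s [])).keys
  -- new_payload = copy.deepcopy(original_payload)  (values are immutable here, the copy is the value)
  let new_payload := PySem.Dict.mk original_payload
  -- for i in range(items_count): ...  (removed_keys is dead for the return value and omitted;
  -- remove_flags[i] / keys[i] IndexError is excluded by Pre_, here pyGetD)
  ((PySem.List.pyRange 0 items_count 1).foldl (fun d i =>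
      let remove_flag := PySem.List.pyGetD remove_flags i false
      if remove_flag then
        let key := PySem.List.pyGetD keys i ""
        match selector with
        | none => PySem.Dict.erase d key
        | some s =>
            -- del new_payload[selector][key]: rewrite the entry at selector with the sub-dict minus key
            PySem.Dict.modify d s [] (fun sub => (PySem.Dict.erase (PySem.Dict.mk sub) key).items)
      else d) new_payload).items

-- ===== PORT B =====
def remove_items_one_iteration_alt (original_payload : List (String × List (String × Int))) (items_count : Int) (remove_flags : List Bool) (selector : Option String) : List (String × List (String × Int)) :=
  -- def keep(j): return not (j < items_count and remove_flags[j])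
  let keep : Int → Bool := fun j =>
    !(decide (j < items_count) && PySem.List.pyGetD remove_flags j false)
  match selector with
  | none =>
      -- {k: deepcopy(v) for j, (k, v) in enumerate(original_payload.items()) if keep(j)}
      (PySem.List.enumerate original_payload 0).filterMap
        (fun jp => if keep jp.1 then some jp.2 else none)
  | some s =>
      -- new_payload[selector] = {k: v for j, (k, v) in enumerate(new_payload[selector].items()) if keep(j)}
      ((PySem.Dict.mk original_payload).insert s
        ((PySem.List.enumerate ((PySem.Dict.mk original_payload).getD s []) 0).filterMap
          (fun jp => if keep jp.1 then some jp.2 else none))).items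

-- ===== PRECONDITION & SPEC =====
-- the key list the loop indexes into (top-level keys, or keys of the selected sub-dict)
def pvSelKeys (original_payload : List (String × List (String × Int))) (selector : Option String) : List String :=
  match selector with
  | none => original_payload.map Prod.fst
  | some s => ((PySem.Dict.mk original_payload).getD s []).map Prod.fst

-- Pre_ excludes (a) association lists with duplicate keys at the top level or inside a value —
-- those represent no Python dict, so A is not defined on them; and (b) exactly the inputs where
-- the Python raises: KeyError (selector absent) and IndexError (remove_flags[i] or keys[i]).
def Pre_remove_items_one_iteration (original_payload : List (String × List (String × Int))) (items_count : Int) (remove_flags : List Bool) (selector : Option String) : Prop :=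
  (original_payload.map Prod.fst).Nodup ∧
  (∀ p ∈ original_payload, (p.2.map Prod.fst).Nodup) ∧
  ((selector.map (fun s => (PySem.Dict.mk original_payload).contains s)).getD true = true) ∧
  (∀ i < items_count.toNat,
      i < remove_flags.length ∧
        (remove_flags.getD i false = true → i < (pvSelKeys original_payload selector).length))

instance (original_payload : List (String × List (String × Int))) (items_count : Int) (remove_flags : List Bool) (selector : Option String) : Decidable (Pre_remove_items_one_iteration original_payload items_count remove_flags selector) := by unfold Pre_remove_items_one_iteration; infer_instance

def pvWitness_remove_items_one_iteration : (List (String × List (String × Int))) × Int × List Bool × Option String :=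
  ([("a", [("x", 1), ("y", 2)]), ("b", [("z", 3)])], 1, [true, false], none)

def Spec_remove_items_one_iteration (original_payload : List (String × List (String × Int))) (items_count : Int) (remove_flags : List Bool) (selector : Option String) (out : List (String × List (String × Int))) : Prop := out = remove_items_one_iteration_alt original_payload items_count remove_flags selector
instance (original_payload : List (String × List (String × Int))) (items_count : Int) (remove_flags : List Bool) (selector : Option String) (out : List (String × List (String × Int))) : Decidable (Spec_remove_items_one_iteration original_payload items_count remove_flags selector out) := by unfold Spec_remove_items_one_iteration; infer_instance

-- ===== CLAIM (what is proved, stated in full; the proofs are below) =====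
def Claim_equal_remove_items_one_iteration : Prop := ∀ (original_payload : List (String × List (String × Int))) (items_count : Int) (remove_flags : List Bool) (selector : Option String), Dom_remove_items_one_iteration original_payload items_count remove_flags selector → Pre_remove_items_one_iteration original_payload items_count remove_flags selector → Spec_remove_items_one_iteration original_payload items_count remove_flags selector (remove_items_one_iteration original_payload items_count remove_flags selector)

-- ===== LEMMAS AND PROOFS =====

theorem pv_contains_add (s : PySem.Set String) (k x : String) :
    PySem.Set.contains (PySem.Set.add s k) x = (PySem.Set.contains s x || x == k) := by
  simp only [PySem.Set.contains_eq_listContains, List.contains_eq_mem, PySem.Set.mem_add,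
    Bool.decide_or]
  by_cases hx : x = k <;> simp [hx]

-- peeling one flagged key off the "collect then filter" side
theorem pv_filter_add {α : Type} (sub0 : List (String × α)) (s : PySem.Set String) (k : String) :
    (sub0.filter (fun p => !(PySem.Set.contains s p.1))).filter (fun p => !(p.1 == k))
      = sub0.filter (fun p => !(PySem.Set.contains (PySem.Set.add s k) p.1)) := by
  rw [List.filter_filter]
  apply List.filter_congr
  intro p _
  rw [pv_contains_add]
  by_cases h1 : PySem.Set.contains s p.1 <;> by_cases h2 : p.1 == k <;> simp [h2]

-- A's erase-as-you-go loop computes a filter by membership in the collected removal set (selector = None shape)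
theorem pv_fold_none {α : Type} (flag : Int → Bool) (key : Int → String) :
    ∀ (idx : List Int) (m : List (String × α)) (s : PySem.Set String),
      (idx.foldl (fun d i => if flag i then PySem.Dict.erase d (key i) else d)
          (PySem.Dict.mk (m.filter (fun p => !(PySem.Set.contains s p.1))))).items
        = m.filter (fun p =>
            !(PySem.Set.contains
              (idx.foldl (fun t i => if flag i then PySem.Set.add t (key i) else t) s) p.1))
  | [], m, s => by simp
  | i :: idx, m, s => by
    by_cases h : flag i
    · have hstep : PySem.Dict.erase (PySem.Dict.mk (m.filter (fun p => !(PySem.Set.contains s p.1)))) (key i)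
          = PySem.Dict.mk (m.filter (fun p => !(PySem.Set.contains (PySem.Set.add s (key i)) p.1))) := by
        simp only [PySem.Dict.erase]
        exact congrArg PySem.Dict.mk (pv_filter_add m s (key i))
      simp only [List.foldl_cons]
      rw [if_pos h, if_pos h, hstep, pv_fold_none flag key idx m (PySem.Set.add s (key i))]
    · simp only [List.foldl_cons]
      rw [if_neg h, if_neg h, pv_fold_none flag key idx m s]

-- m with the (unique, under Nodup) entry at key s0 replaced by (s0, v)
def pvUpdAt {α : Type} (m : List (String × α)) (s0 : String) (v : α) : List (String × α) :=
  m.map (fun p => if p.1 == s0 then (s0, v) else p)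

theorem pv_pvUpdAt_cons {α : Type} (p : String × α) (m : List (String × α)) (s0 : String) (v : α) :
    pvUpdAt (p :: m) s0 v = (if p.1 == s0 then (s0, v) else p) :: pvUpdAt m s0 v := rfl

theorem pv_keys_pvUpdAt {α : Type} (m : List (String × α)) (s0 : String) (v : α) :
    (pvUpdAt m s0 v).map (fun p => p.1) = m.map (fun p => p.1) := by
  simp only [pvUpdAt, List.map_map]
  apply List.map_congr_left
  intro p _
  by_cases h : p.1 == s0
  · simp [Function.comp, (eq_of_beq h).symm]
  · simp [Function.comp, h]

theorem pv_get_pvUpdAt {α : Type} (m : List (String × α)) (s0 : String) (v : α)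
    (h : (PySem.Dict.mk m).contains s0 = true) :
    (PySem.Dict.mk (pvUpdAt m s0 v)).get? s0 = some v := by
  induction m with
  | nil => simp [PySem.Dict.contains] at h
  | cons p m ih =>
    by_cases hp : p.1 == s0
    · rw [pv_pvUpdAt_cons, if_pos hp]
      simp [PySem.Dict.get?, List.find?_cons_of_pos]
    · have h' : (PySem.Dict.mk m).contains s0 = true := by
        simp [PySem.Dict.contains, hp] at h ⊢
        exact h
      rw [pv_pvUpdAt_cons, if_neg (by simpa using hp)]
      have := ih h'
      simp only [PySem.Dict.get?] at this ⊢
      rw [List.find?_cons_of_neg (by simpa using hp)]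
      exact this

theorem pv_pvUpdAt_pvUpdAt {α : Type} (m : List (String × α)) (s0 : String) (v w : α) :
    pvUpdAt (pvUpdAt m s0 v) s0 w = pvUpdAt m s0 w := by
  simp only [pvUpdAt, List.map_map]
  apply List.map_congr_left
  intro p _
  by_cases h : p.1 == s0 <;> simp [Function.comp, h]

theorem pv_pvUpdAt_self {α : Type} (m : List (String × α)) (s0 : String) (v : α)
    (hnd : (m.map Prod.fst).Nodup) (hget : (PySem.Dict.mk m).get? s0 = some v) :
    pvUpdAt m s0 v = m := by
  induction m with
  | nil => rfl
  | cons p m ih =>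
    simp only [List.map_cons, List.nodup_cons] at hnd
    by_cases hp : p.1 == s0
    · have hp' : p.1 = s0 := eq_of_beq hp
      have hf : List.find? (fun q => q.1 == s0) (p :: m) = some p := List.find?_cons_of_pos hp
      have hv : v = p.2 := by
        simp only [PySem.Dict.get?, hf, Option.map_some] at hget
        exact (Option.some_injective _ hget).symm
      have hnot : ∀ q ∈ m, (q.1 == s0) = false := by
        intro q hq
        rw [beq_eq_false_iff_ne]
        intro he
        exact hnd.1 (by rw [hp', ← he]; exact List.mem_map_of_mem hq)
      rw [pv_pvUpdAt_cons, if_pos hp]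
      congr 1
      · simp [← hp', hv]
      · conv_rhs => rw [← List.map_id m]
        unfold pvUpdAt
        apply List.map_congr_left
        intro q hq
        rw [hnot q hq]; simp
    · rw [pv_pvUpdAt_cons, if_neg hp]
      have hget' : (PySem.Dict.mk m).get? s0 = some v := by
        have hf : List.find? (fun q => q.1 == s0) (p :: m) = List.find? (fun q => q.1 == s0) m :=
          List.find?_cons_of_neg hp
        simpa only [PySem.Dict.get?, hf] using hget
      rw [ih hnd.2 hget']

theorem pv_contains_pvUpdAt {α : Type} (m : List (String × α)) (s0 : String) (v : α) (x : String) :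
    (PySem.Dict.mk (pvUpdAt m s0 v)).contains x = (PySem.Dict.mk m).contains x := by
  rw [PySem.Dict.contains_eq_decide_mem_keys, PySem.Dict.contains_eq_decide_mem_keys]
  exact decide_eq_decide.mpr (by simp only [PySem.Dict.keys]; rw [pv_keys_pvUpdAt])

-- A's loop in the selector case: it only ever rewrites the entry at s0
theorem pv_fold_sel (flag : Int → Bool) (key : Int → String) (s0 : String) :
    ∀ (idx : List Int) (m : List (String × List (String × Int))) (sub0 : List (String × Int))
      (s : PySem.Set String), (PySem.Dict.mk m).contains s0 = true →
      (idx.foldl (fun d i => if flag i then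
            PySem.Dict.modify d s0 [] (fun sub => (PySem.Dict.erase (PySem.Dict.mk sub) (key i)).items)
          else d)
          (PySem.Dict.mk (pvUpdAt m s0 (sub0.filter (fun p => !(PySem.Set.contains s p.1)))))).items
        = pvUpdAt m s0 (sub0.filter (fun p =>
            !(PySem.Set.contains
              (idx.foldl (fun t i => if flag i then PySem.Set.add t (key i) else t) s) p.1)))
  | [], m, sub0, s, hc => by simp
  | i :: idx, m, sub0, s, hc => by
    by_cases h : flag i
    · have hstep :
        PySem.Dict.modify (PySem.Dict.mk (pvUpdAt m s0 (sub0.filter (fun p => !(PySem.Set.contains s p.1))))) s0 []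
            (fun sub => (PySem.Dict.erase (PySem.Dict.mk sub) (key i)).items)
          = PySem.Dict.mk (pvUpdAt m s0 (sub0.filter (fun p => !(PySem.Set.contains (PySem.Set.add s (key i)) p.1)))) := by
        rw [PySem.Dict.modify]
        rw [PySem.Dict.getD_eq_get?_getD, pv_get_pvUpdAt _ _ _ hc, Option.getD_some]
        have hc' : (PySem.Dict.mk (pvUpdAt m s0 (sub0.filter (fun p => !(PySem.Set.contains s p.1))))).contains s0 = true := by
          rw [pv_contains_pvUpdAt]; exact hc
        apply PySem.Dict.ext
        rw [PySem.Dict.items_insert_of_contains _ _ hc']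
        show pvUpdAt (pvUpdAt m s0 _) s0 _ = _
        rw [pv_pvUpdAt_pvUpdAt]
        congr 1
        show ((sub0.filter (fun p => !(PySem.Set.contains s p.1))).filter (fun p => !(p.1 == key i))) = _
        exact pv_filter_add sub0 s (key i)
      simp only [List.foldl_cons]
      rw [if_pos h, if_pos h, hstep, pv_fold_sel flag key s0 idx m sub0 (PySem.Set.add s (key i)) hc]
    · simp only [List.foldl_cons]
      rw [if_neg h, if_neg h, pv_fold_sel flag key s0 idx m sub0 s hc]

theorem pv_filter_empty {α : Type} (m : List (String × α)) :
    m.filter (fun p => !(PySem.Set.contains PySem.Set.empty p.1)) = m := by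
  simp [PySem.Set.contains, PySem.Set.empty]

-- membership in the collected removal set
theorem pv_mem_foldset (flag : Int → Bool) (key : Int → String) :
    ∀ (idx : List Int) (s : PySem.Set String) (x : String),
      x ∈ idx.foldl (fun t i => if flag i then PySem.Set.add t (key i) else t) s
        ↔ x ∈ s ∨ ∃ i ∈ idx, flag i = true ∧ key i = x
  | [], s, x => by simp
  | i :: idx, s, x => by
    by_cases h : flag i
    · simp only [List.foldl_cons, if_pos h,
        pv_mem_foldset flag key idx (PySem.Set.add s (key i)) x, PySem.Set.mem_add,
        List.mem_cons]
      constructor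
      · rintro ((hs | hk) | ⟨j, hj, hf, hk⟩)
        · exact Or.inl hs
        · exact Or.inr ⟨i, Or.inl rfl, h, hk.symm⟩
        · exact Or.inr ⟨j, Or.inr hj, hf, hk⟩
      · rintro (hs | ⟨j, (rfl | hj), hf, hk⟩)
        · exact Or.inl (Or.inl hs)
        · exact Or.inl (Or.inr hk.symm)
        · exact Or.inr ⟨j, hj, hf, hk⟩
    · simp only [List.foldl_cons, if_neg h, pv_mem_foldset flag key idx s x, List.mem_cons]
      constructor
      · rintro (hs | ⟨j, hj, hf, hk⟩)
        · exact Or.inl hs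
        · exact Or.inr ⟨j, Or.inr hj, hf, hk⟩
      · rintro (hs | ⟨j, (rfl | hj), hf, hk⟩)
        · exact Or.inl hs
        · exact (h hf).elim
        · exact Or.inr ⟨j, hj, hf, hk⟩

-- a filter by a predicate on the element equals B's positional enumerate pass, given
-- pointwise agreement of the predicates at each index
theorem pv_filter_enumerate {α : Type} (keep : Int → Bool) :
    ∀ (m : List α) (s : Int) (q : α → Bool),
      (∀ (j : Nat) (hj : j < m.length), q m[j] = keep (s + j)) →
      m.filter q
        = (PySem.List.enumerate m s).filterMap (fun jp => if keep jp.1 then some jp.2 else none)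
  | [], s, q, _ => by simp [PySem.List.enumerate_nil]
  | x :: m, s, q, h => by
    have h0 : q x = keep s := by simpa using h 0 (by simp)
    have ht : ∀ (j : Nat) (hj : j < m.length), q m[j] = keep ((s + 1) + j) := by
      intro j hj
      have := h (j + 1) (by simpa using Nat.succ_lt_succ hj)
      simpa [Nat.cast_add, add_comm, add_left_comm, add_assoc] using this
    rw [PySem.List.enumerate_cons, List.filterMap_cons, List.filter_cons,
      ← pv_filter_enumerate keep m (s + 1) q ht, h0]
    by_cases hk : keep s <;> simp [hk]

-- the per-position fact: under Nodup keys and in-range flags, entry j is in the removal set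
-- iff its own index is inside the flagged window and flagged
theorem pv_keep_eq {α : Type} (m : List (String × α)) (ic : Int) (flags : List Bool)
    (hnd : (m.map Prod.fst).Nodup)
    (hidx : ∀ i < ic.toNat, flags.getD i false = true → i < m.length)
    (j : Nat) (hj : j < m.length) :
    (!(PySem.Set.contains
        ((PySem.List.pyRange 0 ic 1).foldl (fun t i =>
          if PySem.List.pyGetD flags i false then
            PySem.Set.add t (PySem.List.pyGetD (m.map Prod.fst) i "") else t) PySem.Set.empty)
        (m[j].1)))
      = !(decide ((j : Int) < ic) && PySem.List.pyGetD flags (j : Int) false) := by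
  congr 1
  have hmem : (m[j].1 ∈ (PySem.List.pyRange 0 ic 1).foldl (fun t i =>
      if PySem.List.pyGetD flags i false then
        PySem.Set.add t (PySem.List.pyGetD (m.map Prod.fst) i "") else t) PySem.Set.empty)
      ↔ ((j : Int) < ic ∧ PySem.List.pyGetD flags (j : Int) false = true) := by
    rw [pv_mem_foldset]
    simp only [PySem.Set.empty, List.not_mem_nil, false_or, PySem.List.mem_pyRange_one]
    constructor
    · rintro ⟨i, ⟨hi0, hiic⟩, hf, hk⟩
      obtain ⟨k, rfl⟩ : ∃ k : Nat, i = (k : Int) := ⟨i.toNat, (Int.toNat_of_nonneg hi0).symm⟩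
      have hfn : flags.getD k false = true := by
        rw [← PySem.List.pyGetD_natCast]; exact hf
      have hilen : k < m.length := hidx k (by omega) hfn
      have hkey : PySem.List.pyGetD (m.map Prod.fst) (k : Int) "" = (m[k]).1 := by
        rw [PySem.List.pyGetD_natCast]
        simp [List.getD_eq_getElem?_getD, hilen]
      have hij : k = j := by
        have : (m[k]).1 = (m[j].1) := by rw [← hkey, hk]
        have hinj := List.Nodup.getElem_inj_iff (l := m.map Prod.fst) hnd
          (hi := by simpa using hilen) (hj := by simpa using hj)
        simp only [List.getElem_map] at hinj
        exact hinj.mp this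
      constructor
      · omega
      · rw [PySem.List.pyGetD_natCast]
        exact hij ▸ hfn
    · rintro ⟨hjic, hf⟩
      refine ⟨(j : Int), ⟨by positivity, hjic⟩, hf, ?_⟩
      rw [PySem.List.pyGetD_natCast, List.getD_eq_getElem?_getD]
      simp [hj]
  rw [PySem.Set.contains_eq_listContains, List.contains_eq_mem]
  by_cases hin : ((j : Int) < ic ∧ PySem.List.pyGetD flags (j : Int) false = true)
  · rw [decide_eq_true (hmem.mpr hin)]
    simp [hin.1, hin.2]
  · rw [decide_eq_false (fun hm => hin (hmem.mp hm))]
    rcases Decidable.not_and_iff_or_not.mp hin with h1 | h2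
    · simp [h1]
    · simp [Bool.eq_false_iff.mpr h2]

theorem pv_keys_mk {α : Type} (m : List (String × α)) :
    (PySem.Dict.mk m).keys = m.map Prod.fst := by
  simp [PySem.Dict.keys]

-- ===== VERDICT (by name: the statement is the Claim_ definition above) =====
theorem remove_items_one_iteration_spec : Claim_equal_remove_items_one_iteration := by
  intro op items_count remove_flags selector _hdom hpre
  obtain ⟨hnd, hsubnd, hsel, hidx⟩ := hpre
  unfold Spec_remove_items_one_iteration
  cases selector with
  | none =>
    have main := pv_fold_none (fun i => PySem.List.pyGetD remove_flags i false)
      (fun i => PySem.List.pyGetD ((PySem.Dict.mk op).keys) i "")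
      (PySem.List.pyRange 0 items_count 1) op PySem.Set.empty
    rw [pv_filter_empty op] at main
    rw [pv_keys_mk] at main
    have hbridge := pv_filter_enumerate
      (fun j => !(decide (j < items_count) && PySem.List.pyGetD remove_flags j false)) op 0
      (fun p => !(PySem.Set.contains
        ((PySem.List.pyRange 0 items_count 1).foldl (fun t i =>
          if PySem.List.pyGetD remove_flags i false then
            PySem.Set.add t (PySem.List.pyGetD (op.map Prod.fst) i "") else t)
          PySem.Set.empty) p.1))
      (by
        intro j hj
        have := pv_keep_eq op items_count remove_flags hnd
          (fun i hi hf => by simpa [pvSelKeys] using (hidx i hi).2 hf) j hj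
        simpa using this)
    exact main.trans hbridge
  | some s0 =>
    have hc : (PySem.Dict.mk op).contains s0 = true := by simpa using hsel
    obtain ⟨w, hw⟩ : ∃ w, (PySem.Dict.mk op).get? s0 = some w := by
      have := PySem.Dict.contains_eq_isSome_get? (d := PySem.Dict.mk op) (k := s0)
      rw [this] at hc
      exact Option.isSome_iff_exists.mp hc
    have hc' : (PySem.Dict.mk op).contains s0 = true := by simpa using hsel
    have hsub : (PySem.Dict.mk op).getD s0 [] = w := by
      rw [PySem.Dict.getD_eq_get?_getD, hw]; rfl
    have hget' : (PySem.Dict.mk op).get? s0 = some ((PySem.Dict.mk op).getD s0 []) := by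
      rw [hsub]; exact hw
    -- the selected sub-dict is a value of op, so its keys are Nodup
    have hsubnd' : (((PySem.Dict.mk op).getD s0 []).map Prod.fst).Nodup := by
      rw [hsub]
      have hfind : (op.find? (fun q => q.1 == s0)).map Prod.snd = some w := by
        simpa [PySem.Dict.get?] using hw
      cases hfe : op.find? (fun q => q.1 == s0) with
      | none => rw [hfe] at hfind; simp at hfind
      | some p =>
        rw [hfe] at hfind
        have hpw : p.2 = w := by simpa using hfind
        exact hpw ▸ hsubnd p (List.mem_of_find?_eq_some hfe)
    have main := pv_fold_sel (fun i => PySem.List.pyGetD remove_flags i false)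
      (fun i => PySem.List.pyGetD ((PySem.Dict.mk ((PySem.Dict.mk op).getD s0 [])).keys) i "") s0
      (PySem.List.pyRange 0 items_count 1) op ((PySem.Dict.mk op).getD s0 []) PySem.Set.empty hc'
    rw [pv_filter_empty ((PySem.Dict.mk op).getD s0 []),
        pv_pvUpdAt_self op s0 ((PySem.Dict.mk op).getD s0 []) hnd hget'] at main
    rw [pv_keys_mk] at main
    have hbridge := pv_filter_enumerate
      (fun j => !(decide (j < items_count) && PySem.List.pyGetD remove_flags j false))
      ((PySem.Dict.mk op).getD s0 []) 0
      (fun p => !(PySem.Set.contains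
        ((PySem.List.pyRange 0 items_count 1).foldl (fun t i =>
          if PySem.List.pyGetD remove_flags i false then
            PySem.Set.add t
              (PySem.List.pyGetD (((PySem.Dict.mk op).getD s0 []).map Prod.fst) i "") else t)
          PySem.Set.empty) p.1))
      (by
        intro j hj
        have := pv_keep_eq ((PySem.Dict.mk op).getD s0 []) items_count remove_flags hsubnd'
          (fun i hi hf => by simpa [pvSelKeys] using (hidx i hi).2 hf) j hj
        simpa using this)
    have hB : remove_items_one_iteration_alt op items_count remove_flags (some s0)
        = pvUpdAt op s0
            ((PySem.List.enumerate ((PySem.Dict.mk op).getD s0 []) 0).filterMap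
              (fun jp => if !(decide (jp.1 < items_count) && PySem.List.pyGetD remove_flags jp.1 false)
                then some jp.2 else none)) := by
      show ((PySem.Dict.mk op).insert s0 _).items = _
      rw [PySem.Dict.items_insert_of_contains _ _ hc']
      rfl
    exact main.trans ((congrArg (pvUpdAt op s0) hbridge).trans hB.symm)
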